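-- pv_equiv track=rewrite | github.com/Orkat/Algorithmes-TPs | tp4/tp4_functions.py | approx_union_len
-- ===== SOURCE A (Python) =====
-- def approx_union_len(hash_array_a, hash_array_b):
--
--     ret = 0
--     for i in range(0, len(hash_array_a)):
--         if hash_array_a[i] == hash_array_b[i]:
--             ret += 1
--         else:
--             ret += 2
--     return ret
-- ===== SOURCE B (Python) =====
-- def approx_union_len(hash_array_a, hash_array_b):
--     # Divide and conquer: split the index range in half, solve each half
--     # recursively (depth O(log n)), leaves score 1 for a match and 2 otherwise.
--     def go(lo, hi):
--         n = hi - lo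
--         if n == 0:
--             return 0
--         if n == 1:
--             return 1 if hash_array_a[lo] == hash_array_b[lo] else 2
--         mid = (lo + hi) // 2
--         return go(lo, mid) + go(mid, hi)
--     return go(0, len(hash_array_a))
-- ===== Notes on version B (the rewrite author's own statement) =====
-- stated objective: alternative
-- what changed: Replaces the left-to-right accumulator loop with a divide-and-conquer recursion that splits the index range in half and sums the two halves' scores.
import Mathlib
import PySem

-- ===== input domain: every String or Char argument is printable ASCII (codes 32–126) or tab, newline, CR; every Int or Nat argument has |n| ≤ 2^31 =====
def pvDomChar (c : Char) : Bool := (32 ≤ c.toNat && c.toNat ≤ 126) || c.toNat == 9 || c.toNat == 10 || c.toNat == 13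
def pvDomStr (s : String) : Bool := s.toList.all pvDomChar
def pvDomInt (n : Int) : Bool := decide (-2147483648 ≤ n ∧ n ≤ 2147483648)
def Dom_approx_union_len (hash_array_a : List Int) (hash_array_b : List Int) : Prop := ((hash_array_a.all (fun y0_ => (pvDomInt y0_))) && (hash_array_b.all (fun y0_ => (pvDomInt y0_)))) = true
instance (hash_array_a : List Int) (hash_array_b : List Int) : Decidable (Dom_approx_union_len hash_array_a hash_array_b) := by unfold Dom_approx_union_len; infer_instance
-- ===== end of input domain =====

-- B replaces the left-to-right accumulator loop with a divide-and-conquer recursion over the index range (alternative decomposition, same O(n) cost).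
-- ===== PORT A =====
def approx_union_len (hash_array_a : List Int) (hash_array_b : List Int) : Int :=
  (PySem.List.pyRange 0 hash_array_a.length 1).foldl
    (fun ret i =>
      if PySem.List.pyGetD hash_array_a i 0 == PySem.List.pyGetD hash_array_b i 0
      then ret + 1 else ret + 2) 0

-- ===== PORT B =====
-- termination helper: the midpoint strictly splits an interval of length ≥ 2
theorem pvMidSplit (lo hi : Int) (h : ¬ hi - lo = 0) (h1 : ¬ hi - lo = 1) (hle : lo ≤ hi) :
    lo < PySem.Int.floordiv (lo + hi) 2 ∧ PySem.Int.floordiv (lo + hi) 2 < hi := by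
  rw [PySem.Int.floordiv_eq_ediv_of_pos (by omega)]
  omega

def approx_union_len_alt_go (hash_array_a : List Int) (hash_array_b : List Int) (lo hi : Int)
    (hle : lo ≤ hi) : Int :=
  if h : hi - lo = 0 then 0
  else if h1 : hi - lo = 1 then
    (if PySem.List.pyGetD hash_array_a lo 0 == PySem.List.pyGetD hash_array_b lo 0 then 1 else 2)
  else
    approx_union_len_alt_go hash_array_a hash_array_b lo (PySem.Int.floordiv (lo + hi) 2)
      (le_of_lt (pvMidSplit lo hi h h1 hle).1)
    + approx_union_len_alt_go hash_array_a hash_array_b (PySem.Int.floordiv (lo + hi) 2) hi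
      (le_of_lt (pvMidSplit lo hi h h1 hle).2)
termination_by (hi - lo).toNat
decreasing_by
  · have := pvMidSplit lo hi h h1 hle; omega
  · have := pvMidSplit lo hi h h1 hle; omega

def approx_union_len_alt (hash_array_a : List Int) (hash_array_b : List Int) : Int :=
  approx_union_len_alt_go hash_array_a hash_array_b 0 hash_array_a.length
    (by exact_mod_cast Int.natCast_nonneg _)

-- ===== PRECONDITION & SPEC =====
-- Pre_ excludes exactly the inputs where Python A raises IndexError (hash_array_b shorter than hash_array_a).
def Pre_approx_union_len (hash_array_a : List Int) (hash_array_b : List Int) : Prop :=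
  hash_array_a.length ≤ hash_array_b.length
instance (hash_array_a : List Int) (hash_array_b : List Int) : Decidable (Pre_approx_union_len hash_array_a hash_array_b) := by unfold Pre_approx_union_len; infer_instance
def pvWitness_approx_union_len : List Int × List Int := ([1, 2, 3], [1, 0, 3])

def Spec_approx_union_len (hash_array_a : List Int) (hash_array_b : List Int) (out : Int) : Prop := out = approx_union_len_alt hash_array_a hash_array_b
instance (hash_array_a : List Int) (hash_array_b : List Int) (out : Int) : Decidable (Spec_approx_union_len hash_array_a hash_array_b out) := by unfold Spec_approx_union_len; infer_instance

-- ===== CLAIM (what is proved, stated in full; the proofs are below) =====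
def Claim_equal_approx_union_len : Prop := ∀ (hash_array_a : List Int) (hash_array_b : List Int), Dom_approx_union_len hash_array_a hash_array_b → Pre_approx_union_len hash_array_a hash_array_b → Spec_approx_union_len hash_array_a hash_array_b (approx_union_len hash_array_a hash_array_b)

-- ===== LEMMAS AND PROOFS =====
-- the per-index weight both programs score
def pvW (a b : List Int) (i : Int) : Int :=
  if PySem.List.pyGetD a i 0 == PySem.List.pyGetD b i 0 then 1 else 2

-- A's fold equals the sum of weights over the range
theorem pvFoldA (a b : List Int) :
    ∀ (L : List Int) (r : Int),
      L.foldl (fun ret i =>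
        if PySem.List.pyGetD a i 0 == PySem.List.pyGetD b i 0
        then ret + 1 else ret + 2) r
      = r + (L.map (pvW a b)).sum := by
  intro L
  induction L with
  | nil => intro r; simp
  | cons i L ih =>
      intro r
      simp only [List.foldl_cons, List.map_cons, List.sum_cons]
      rw [ih]
      unfold pvW
      by_cases h : (PySem.List.pyGetD a i 0 == PySem.List.pyGetD b i 0) = true <;>
        simp only [h, if_true, if_false, Bool.false_eq_true] <;> ring

-- B's divide-and-conquer equals the same sum of weights over the range
theorem pvGoEq (a b : List Int) (lo hi : Int) (hle : lo ≤ hi) :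
    approx_union_len_alt_go a b lo hi hle
      = ((PySem.List.pyRange lo hi 1).map (pvW a b)).sum := by
  rw [approx_union_len_alt_go]
  by_cases h : hi - lo = 0
  · rw [dif_pos h, PySem.List.pyRange_one_eq_nil (by omega)]; simp
  · rw [dif_neg h]
    by_cases h1 : hi - lo = 1
    · rw [dif_pos h1]
      have hhi : hi = lo + 1 := by omega
      subst hhi
      rw [PySem.List.pyRange_one_singleton]
      simp [pvW]
    · rw [dif_neg h1]
      have hm := pvMidSplit lo hi h h1 hle
      rw [pvGoEq a b lo _ (le_of_lt hm.1), pvGoEq a b _ hi (le_of_lt hm.2),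
        PySem.List.pyRange_one_append lo (PySem.Int.floordiv (lo + hi) 2) hi
          (le_of_lt hm.1) (le_of_lt hm.2)]
      simp
termination_by (hi - lo).toNat
decreasing_by
  · have := pvMidSplit lo hi h h1 hle; omega
  · have := pvMidSplit lo hi h h1 hle; omega

-- ===== VERDICT (by name: the statement is the Claim_ definition above) =====
theorem approx_union_len_spec : Claim_equal_approx_union_len := by
  intro a b _ _
  unfold Spec_approx_union_len approx_union_len approx_union_len_alt
  rw [pvFoldA, pvGoEq]
  simp
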